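-- pv_equiv track=rewrite | github.com/sethbroberts/fundamentals_of_measurement | fom.py | make_mapping_corresponding_to_equivalence_relation
-- ===== SOURCE A (Python) =====
-- def find_equivalence_class(element, relation):
--     "Given an element and an equivalence relation, find equivalence class"
--     equivalence_class = {}
--     x1, y1 = relation[0]
--     if type(x1) == type([1, 2]):
--         for e1, e2 in relation:
--             k1, k2 = str(e1), str(e2)
--             if element == e1 or element == e2:
--                 equivalence_class[k1] = e1
--                 equivalence_class[k2] = e2
--         final_list_redundant = []
--         for i in equivalence_class.keys():
--             final_list_redundant.append(equivalence_class[i])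
--         final_list = remove_redundant_items(final_list_redundant)
--         return(final_list)
--
--     else:
--         for e1, e2 in relation:
--             if element == e1 or element == e2:
--                 equivalence_class[e1] = 1
--                 equivalence_class[e2] = 1
--         return sorted(list(equivalence_class.keys()))
--
-- def get_underlying_elements_from_relation(relation):
--     "Given a relation, find the underlying elements of the set"
--     underlying_elements_duplicates = []
--     for e1, e2 in relation:
--         underlying_elements_duplicates.append(e1)
--         underlying_elements_duplicates.append(e2)
--     underlying_elements = remove_redundant_items(underlying_elements_duplicates)
--     underlying_elements.sort()
--     return underlying_elements
--
-- def find_partition_from_equivalence_relation(equivalence_relation):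
--     "Given an equivalence relation, find the corresponding partition"
--     S = get_underlying_elements_from_relation(equivalence_relation)
--     blocks_with_duplicates = []
--     for element in S:
--         equivalence_class = find_equivalence_class(element, equivalence_relation)
--         blocks_with_duplicates.append(equivalence_class)
--     blocks = []
--     for block in blocks_with_duplicates:
--         if block not in blocks:
--             blocks.append(block)
--     return sorted(blocks)
--
-- def remove_redundant_items(redundant_list):
--     "Remove redundant items from a list"
--     non_redundant_list = []
--     for item in redundant_list:
--         if item not in non_redundant_list:
--             non_redundant_list.append(item)
--     non_redundant_list.sort()
--     return non_redundant_list
--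
-- def make_mapping_corresponding_to_equivalence_relation(equivalence_relation):
--     "Given an equivalence relation, make a mapping such that R = R_f"
--     partition = find_partition_from_equivalence_relation(equivalence_relation)
--     mapping = []
--     for i, block in enumerate(partition):
--         for s in block:
--             mapping.append((s, i))
--     mapping.sort()
--     return mapping
-- ===== SOURCE B (Python) =====
-- def make_mapping_corresponding_to_equivalence_relation(equivalence_relation):
--     "Given an equivalence relation, make a mapping such that R = R_f"
--     # one pass: hash index element -> set of partners (both endpoints of each pair)
--     adj = {}
--     for a, b in equivalence_relation:
--         adj.setdefault(a, set()).add(b)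
--         adj.setdefault(b, set()).add(a)
--     blocks = sorted({tuple(sorted(nbrs | {x})) for x, nbrs in adj.items()})
--     return sorted((s, i) for i, block in enumerate(blocks) for s in block)
-- ===== Notes on version B (the rewrite author's own statement) =====
-- stated objective: faster
-- what changed: One pass builds a hash index element -> set of partners, so the per-element rescan of the whole relation and all quadratic 'not in list' dedup loops disappear; blocks come from a set comprehension and one sort.
import Mathlib
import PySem

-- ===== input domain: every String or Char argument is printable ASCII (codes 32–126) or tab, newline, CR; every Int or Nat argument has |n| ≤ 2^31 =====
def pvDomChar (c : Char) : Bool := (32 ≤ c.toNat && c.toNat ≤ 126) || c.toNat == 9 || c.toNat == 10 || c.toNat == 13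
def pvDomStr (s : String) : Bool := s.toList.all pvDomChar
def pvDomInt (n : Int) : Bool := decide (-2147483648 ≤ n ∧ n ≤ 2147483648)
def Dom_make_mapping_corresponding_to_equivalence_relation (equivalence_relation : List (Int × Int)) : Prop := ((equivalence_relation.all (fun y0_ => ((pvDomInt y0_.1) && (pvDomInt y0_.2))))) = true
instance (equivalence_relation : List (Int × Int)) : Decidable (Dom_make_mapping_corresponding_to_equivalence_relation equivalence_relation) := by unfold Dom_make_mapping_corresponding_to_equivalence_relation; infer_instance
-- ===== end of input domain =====

-- B replaces A's per-element rescans of the relation and quadratic list dedups by one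
-- hash-indexed pass (element -> set of partners) plus sorting; proved to return A's exact value.

-- ===== PORT A =====

-- remove_redundant_items: append-if-absent loop, then .sort()
def remove_redundant_items (redundant_list : List Int) : List Int :=
  PySem.List.sorted
    (redundant_list.foldl (fun acc item => if acc.contains item then acc else acc ++ [item]) [])
    (fun x => x) false

-- find_equivalence_class: the relation's elements are ints here, so Python's
-- 'type(x1) == type([1, 2])' branch can never fire; only the else branch is ported.
-- (The unpacking 'x1, y1 = relation[0]' raises only on an empty relation, on which the
-- entry function never calls this helper.)
def find_equivalence_class (element : Int) (relation : List (Int × Int)) : List Int :=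
  let d : PySem.Dict Int Int :=
    relation.foldl
      (fun d p => if element == p.1 || element == p.2 then (d.insert p.1 1).insert p.2 1 else d)
      PySem.Dict.empty
  PySem.List.sorted d.keys (fun x => x) false

def get_underlying_elements_from_relation (relation : List (Int × Int)) : List Int :=
  let underlying_elements_duplicates :=
    relation.foldl (fun acc p => (acc ++ [p.1]) ++ [p.2]) []
  let underlying_elements := remove_redundant_items underlying_elements_duplicates
  PySem.List.sorted underlying_elements (fun x => x) false

def find_partition_from_equivalence_relation (equivalence_relation : List (Int × Int)) : List (List Int) :=
  let S := get_underlying_elements_from_relation equivalence_relation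
  let blocks_with_duplicates :=
    S.foldl (fun acc element => acc ++ [find_equivalence_class element equivalence_relation]) []
  let blocks :=
    blocks_with_duplicates.foldl (fun acc block => if acc.contains block then acc else acc ++ [block]) []
  PySem.List.sorted blocks (fun b => b) false

def make_mapping_corresponding_to_equivalence_relation (equivalence_relation : List (Int × Int)) : List (Int × Int) :=
  let partition := find_partition_from_equivalence_relation equivalence_relation
  let mapping :=
    (PySem.List.enumerate partition).foldl
      (fun acc ib => ib.2.foldl (fun acc2 s => acc2 ++ [(s, ib.1)]) acc) []
  PySem.List.sorted2 mapping (fun q => q.1) (fun q => q.2) false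

-- ===== PORT B =====

-- adj = {}; for a, b in R: adj.setdefault(a, set()).add(b); adj.setdefault(b, set()).add(a)
def pvAdj (equivalence_relation : List (Int × Int)) : PySem.Dict Int (PySem.Set Int) :=
  equivalence_relation.foldl
    (fun d p =>
      (d.modify p.1 PySem.Set.empty (fun s => PySem.Set.add s p.2)).modify
        p.2 PySem.Set.empty (fun s => PySem.Set.add s p.1))
    PySem.Dict.empty

def make_mapping_corresponding_to_equivalence_relation_alt (equivalence_relation : List (Int × Int)) : List (Int × Int) :=
  let adj := pvAdj equivalence_relation
  -- blocks = sorted({tuple(sorted(nbrs | {x})) for x, nbrs in adj.items()})  (nbrs | {x} = nbrs.add(x))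
  let blocks :=
    PySem.List.sorted
      (PySem.Set.ofList (adj.items.map (fun kv => PySem.List.sorted (PySem.Set.add kv.2 kv.1) (fun x => x) false)))
      (fun b => b) false
  PySem.List.sorted2
    ((PySem.List.enumerate blocks).flatMap (fun ib => ib.2.map (fun s => (s, ib.1))))
    (fun q => q.1) (fun q => q.2) false

-- ===== PRECONDITION & SPEC =====
def Spec_make_mapping_corresponding_to_equivalence_relation (equivalence_relation : List (Int × Int)) (out : List (Int × Int)) : Prop := out = make_mapping_corresponding_to_equivalence_relation_alt equivalence_relation
instance (equivalence_relation : List (Int × Int)) (out : List (Int × Int)) : Decidable (Spec_make_mapping_corresponding_to_equivalence_relation equivalence_relation out) := by unfold Spec_make_mapping_corresponding_to_equivalence_relation; infer_instance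

-- ===== CLAIM (what is proved, stated in full; the proofs are below) =====
def Claim_equal_make_mapping_corresponding_to_equivalence_relation : Prop := ∀ (equivalence_relation : List (Int × Int)), Dom_make_mapping_corresponding_to_equivalence_relation equivalence_relation → Spec_make_mapping_corresponding_to_equivalence_relation equivalence_relation (make_mapping_corresponding_to_equivalence_relation equivalence_relation)

-- ===== LEMMAS AND PROOFS =====

-- keys of the dict built inside find_equivalence_class
lemma fecKeys_mem (element : Int) (relation : List (Int × Int)) (d : PySem.Dict Int Int) (k : Int) :
    k ∈ (relation.foldl
      (fun d p => if element == p.1 || element == p.2 then (d.insert p.1 1).insert p.2 1 else d) d).keys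
    ↔ k ∈ d.keys ∨ ∃ p ∈ relation, (element = p.1 ∨ element = p.2) ∧ (k = p.1 ∨ k = p.2) := by
  induction relation generalizing d with
  | nil => simp
  | cons q t ih =>
    simp only [List.foldl_cons, ih, List.mem_cons]
    by_cases h : element = q.1 ∨ element = q.2
    · have : (element == q.1 || element == q.2) = true := by
        rcases h with h | h <;> simp [h]
      simp only [this, if_pos, PySem.Dict.mem_keys_insert]
      constructor
      · rintro ((hk | hk | hk) | ⟨p, hp, hep, hkp⟩)
        · exact Or.inr ⟨q, Or.inl rfl, h, Or.inr hk⟩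
        · exact Or.inr ⟨q, Or.inl rfl, h, Or.inl hk⟩
        · exact Or.inl hk
        · exact Or.inr ⟨p, Or.inr hp, hep, hkp⟩
      · rintro (hk | ⟨p, (rfl | hp), hep, hkp⟩)
        · exact Or.inl (Or.inr (Or.inr hk))
        · rcases hkp with hk | hk
          · exact Or.inl (Or.inr (Or.inl hk))
          · exact Or.inl (Or.inl hk)
        · exact Or.inr ⟨p, hp, hep, hkp⟩
    · have : (element == q.1 || element == q.2) = false := by
        simp only [Bool.or_eq_false_iff, beq_eq_false_iff_ne, ne_eq]
        exact ⟨fun e => h (Or.inl e), fun e => h (Or.inr e)⟩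
      simp only [this]
      constructor
      · rintro (hk | ⟨p, hp, hep, hkp⟩)
        · exact Or.inl hk
        · exact Or.inr ⟨p, Or.inr hp, hep, hkp⟩
      · rintro (hk | ⟨p, (rfl | hp), hep, hkp⟩)
        · exact Or.inl hk
        · exact absurd hep h
        · exact Or.inr ⟨p, hp, hep, hkp⟩

lemma fecKeys_nodup (element : Int) (relation : List (Int × Int)) (d : PySem.Dict Int Int)
    (hd : d.keys.Nodup) :
    (relation.foldl
      (fun d p => if element == p.1 || element == p.2 then (d.insert p.1 1).insert p.2 1 else d) d).keys.Nodup := by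
  induction relation generalizing d with
  | nil => simpa
  | cons q t ih =>
    simp only [List.foldl_cons]
    split_ifs with h
    · exact ih _ (PySem.Dict.nodup_keys_insert _ _ _ (PySem.Dict.nodup_keys_insert _ _ _ hd))
    · exact ih _ hd

-- adjacency dict of B: key membership
lemma adjKeys_mem (relation : List (Int × Int)) (d : PySem.Dict Int (PySem.Set Int)) (k : Int) :
    k ∈ (relation.foldl
      (fun d p => (d.modify p.1 PySem.Set.empty (fun s => PySem.Set.add s p.2)).modify
        p.2 PySem.Set.empty (fun s => PySem.Set.add s p.1)) d).keys
    ↔ k ∈ d.keys ∨ ∃ p ∈ relation, k = p.1 ∨ k = p.2 := by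
  induction relation generalizing d with
  | nil => simp
  | cons q t ih =>
    simp only [List.foldl_cons, ih, PySem.Dict.keys_modify, PySem.Dict.mem_keys_insert, List.mem_cons]
    constructor
    · rintro ((hk | hk | hk) | ⟨p, hp, hkp⟩)
      · exact Or.inr ⟨q, Or.inl rfl, Or.inr hk⟩
      · exact Or.inr ⟨q, Or.inl rfl, Or.inl hk⟩
      · exact Or.inl hk
      · exact Or.inr ⟨p, Or.inr hp, hkp⟩
    · rintro (hk | ⟨p, (rfl | hp), hkp⟩)
      · exact Or.inl (Or.inr (Or.inr hk))
      · rcases hkp with hk | hk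
        · exact Or.inl (Or.inr (Or.inl hk))
        · exact Or.inl (Or.inl hk)
      · exact Or.inr ⟨p, hp, hkp⟩

lemma adjKeys_nodup (relation : List (Int × Int)) (d : PySem.Dict Int (PySem.Set Int))
    (hd : d.keys.Nodup) :
    (relation.foldl
      (fun d p => (d.modify p.1 PySem.Set.empty (fun s => PySem.Set.add s p.2)).modify
        p.2 PySem.Set.empty (fun s => PySem.Set.add s p.1)) d).keys.Nodup := by
  induction relation generalizing d with
  | nil => simpa
  | cons q t ih =>
    simp only [List.foldl_cons]
    refine ih _ ?_
    rw [PySem.Dict.keys_modify]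
    refine PySem.Dict.nodup_keys_insert _ _ _ ?_
    rw [PySem.Dict.keys_modify]
    exact PySem.Dict.nodup_keys_insert _ _ _ hd

-- adjacency dict of B: value membership
-- one update step of B's adjacency dict
lemma adjStep_getD_mem (d : PySem.Dict Int (PySem.Set Int)) (q : Int × Int) (k x : Int) :
    x ∈ ((d.modify q.1 PySem.Set.empty (fun s => PySem.Set.add s q.2)).modify
      q.2 PySem.Set.empty (fun s => PySem.Set.add s q.1)).getD k PySem.Set.empty
    ↔ x ∈ d.getD k PySem.Set.empty ∨ (k = q.1 ∧ x = q.2) ∨ (k = q.2 ∧ x = q.1) := by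
  by_cases h3 : q.1 = q.2 <;> by_cases h1 : k = q.1 <;> by_cases h2 : k = q.2 <;>
    first
      | (simp [PySem.Dict.getD_modify, PySem.Set.mem_add, h1, h2, h3, Ne.symm h3] <;> tauto)
      | (simp [PySem.Dict.getD_modify, PySem.Set.mem_add, h1, h2, h3] <;> tauto)

lemma adjStep_getD_nodup (d : PySem.Dict Int (PySem.Set Int)) (q : Int × Int)
    (hd : ∀ k, (d.getD k PySem.Set.empty).Nodup) (k : Int) :
    (((d.modify q.1 PySem.Set.empty (fun s => PySem.Set.add s q.2)).modify
      q.2 PySem.Set.empty (fun s => PySem.Set.add s q.1)).getD k PySem.Set.empty).Nodup := by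
  simp only [PySem.Dict.getD_modify]
  split_ifs <;> repeat (first | apply PySem.Set.nodup_add | exact hd _)

-- adjacency dict of B: value membership
lemma adjGetD_mem (relation : List (Int × Int)) (d : PySem.Dict Int (PySem.Set Int)) (k x : Int) :
    x ∈ (relation.foldl
      (fun d p => (d.modify p.1 PySem.Set.empty (fun s => PySem.Set.add s p.2)).modify
        p.2 PySem.Set.empty (fun s => PySem.Set.add s p.1)) d).getD k PySem.Set.empty
    ↔ x ∈ d.getD k PySem.Set.empty ∨ ∃ p ∈ relation, (k = p.1 ∧ x = p.2) ∨ (k = p.2 ∧ x = p.1) := by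
  induction relation generalizing d with
  | nil => simp
  | cons q t ih =>
    simp only [List.foldl_cons, ih, adjStep_getD_mem, List.mem_cons]
    constructor
    · rintro ((hx | h) | ⟨p, hp, h⟩)
      exacts [Or.inl hx, Or.inr ⟨q, Or.inl rfl, h⟩, Or.inr ⟨p, Or.inr hp, h⟩]
    · rintro (hx | ⟨p, (rfl | hp), h⟩)
      exacts [Or.inl (Or.inl hx), Or.inl (Or.inr h), Or.inr ⟨p, hp, h⟩]

lemma adjGetD_nodup (relation : List (Int × Int)) (d : PySem.Dict Int (PySem.Set Int))
    (hd : ∀ k, (d.getD k PySem.Set.empty).Nodup) (k : Int) :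
    ((relation.foldl
      (fun d p => (d.modify p.1 PySem.Set.empty (fun s => PySem.Set.add s p.2)).modify
        p.2 PySem.Set.empty (fun s => PySem.Set.add s p.1)) d).getD k PySem.Set.empty).Nodup := by
  induction relation generalizing d with
  | nil => exact hd k
  | cons q t ih =>
    simp only [List.foldl_cons]
    exact ih _ (adjStep_getD_nodup d q hd)

-- membership in A's list of underlying elements S
lemma mem_S (relation : List (Int × Int)) (a : Int) :
    a ∈ get_underlying_elements_from_relation relation ↔ ∃ p ∈ relation, a = p.1 ∨ a = p.2 := by
  unfold get_underlying_elements_from_relation remove_redundant_items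
  have hdup : relation.foldl (fun acc p => (acc ++ [p.1]) ++ [p.2]) []
      = relation.flatMap (fun p => [p.1, p.2]) := by
    have := PySem.List.foldl_append_eq_flatMap (fun p : Int × Int => [p.1, p.2]) relation []
    simpa using this
  have hd : (fun (acc : List Int) item => if acc.contains item then acc else acc ++ [item])
      = PySem.Set.add := rfl
  simp only [PySem.List.mem_sorted, hd, hdup, ← PySem.Set.ofList_eq_foldl, PySem.Set.mem_ofList,
    List.mem_flatMap, List.mem_cons, List.not_mem_nil, or_false]

-- A's class of x equals B's block of x, for any x occurring in the relation
lemma class_eq (relation : List (Int × Int)) (x : Int)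
    (hx : ∃ p ∈ relation, x = p.1 ∨ x = p.2) :
    find_equivalence_class x relation
      = PySem.List.sorted (PySem.Set.add ((pvAdj relation).getD x PySem.Set.empty) x) (fun y => y) false := by
  unfold find_equivalence_class pvAdj
  have hperm : (relation.foldl
      (fun (d : PySem.Dict Int Int) p => if x == p.1 || x == p.2 then (d.insert p.1 1).insert p.2 1 else d)
      PySem.Dict.empty).keys.Perm
      (PySem.Set.add ((relation.foldl
        (fun d p => (d.modify p.1 PySem.Set.empty (fun s => PySem.Set.add s p.2)).modify
          p.2 PySem.Set.empty (fun s => PySem.Set.add s p.1)) PySem.Dict.empty).getD x PySem.Set.empty) x) := by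
    rw [List.perm_ext_iff_of_nodup
      (fecKeys_nodup x relation PySem.Dict.empty (by simp [PySem.Dict.keys_empty]))
      (PySem.Set.nodup_add _ _ (adjGetD_nodup relation PySem.Dict.empty (fun k => by simp [PySem.Dict.getD_empty, PySem.Set.empty]) x))]
    intro e
    rw [fecKeys_mem, PySem.Set.mem_add, adjGetD_mem]
    simp only [PySem.Dict.keys_empty, List.not_mem_nil, false_or, PySem.Dict.getD_empty,
      PySem.Set.empty]
    constructor
    · rintro ⟨p, hp, hxp, hep⟩
      by_cases hex : e = x
      · exact Or.inr hex
      · left; refine ⟨p, hp, ?_⟩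
        rcases hxp with hx1 | hx2 <;> rcases hep with he1 | he2
        · exact absurd (he1.trans hx1.symm) hex
        · exact Or.inl ⟨hx1, he2⟩
        · exact Or.inr ⟨hx2, he1⟩
        · exact absurd (he2.trans hx2.symm) hex
    · rintro (⟨p, hp, (⟨hk, hx'⟩ | ⟨hk, hx'⟩)⟩ | rfl)
      · exact ⟨p, hp, Or.inl hk, Or.inr hx'⟩
      · exact ⟨p, hp, Or.inr hk, Or.inl hx'⟩
      · rcases hx with ⟨p, hp, h⟩
        exact ⟨p, hp, h, h⟩
  have := PySem.List.sorted_eq_sorted_of_perm _ _ (fun a : Int => a) (fun a b h => h) hperm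
  convert this using 2

-- the two partitions agree
lemma partition_eq (relation : List (Int × Int)) :
    find_partition_from_equivalence_relation relation
      = PySem.List.sorted
          (PySem.Set.ofList ((pvAdj relation).items.map
            (fun kv => PySem.List.sorted (PySem.Set.add kv.2 kv.1) (fun y => y) false)))
          (fun b => b) false := by
  unfold find_partition_from_equivalence_relation
  have hbwd : (get_underlying_elements_from_relation relation).foldl
      (fun acc element => acc ++ [find_equivalence_class element relation]) []
      = (get_underlying_elements_from_relation relation).map (fun e => find_equivalence_class e relation) := by
    simpa using PySem.List.foldl_append_singleton_eq_map
      (fun e => find_equivalence_class e relation) (get_underlying_elements_from_relation relation) []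
  have hd : (fun (acc : List (List Int)) block => if acc.contains block then acc else acc ++ [block])
      = PySem.Set.add := rfl
  simp only [hbwd, hd, ← PySem.Set.ofList_eq_foldl]
  have hnodupkeys : (pvAdj relation).keys.Nodup :=
    adjKeys_nodup relation PySem.Dict.empty (by simp [PySem.Dict.keys_empty])
  have hitems : (pvAdj relation).items
      = (pvAdj relation).keys.map (fun k => (k, (pvAdj relation).getD k PySem.Set.empty)) :=
    PySem.Dict.items_eq_map_keys _ hnodupkeys _
  have hperm : (PySem.Set.ofList ((get_underlying_elements_from_relation relation).map
        (fun e => find_equivalence_class e relation))).Perm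
      (PySem.Set.ofList ((pvAdj relation).items.map
        (fun kv => PySem.List.sorted (PySem.Set.add kv.2 kv.1) (fun y => y) false))) := by
    rw [List.perm_ext_iff_of_nodup (PySem.Set.nodup_ofList _) (PySem.Set.nodup_ofList _)]
    intro b
    rw [PySem.Set.mem_ofList, PySem.Set.mem_ofList, hitems, List.map_map]
    simp only [List.mem_map, Function.comp]
    constructor
    · rintro ⟨e, he, rfl⟩
      have hx : ∃ p ∈ relation, e = p.1 ∨ e = p.2 := (mem_S relation e).mp he
      refine ⟨e, ?_, (class_eq relation e hx).symm⟩
      rw [pvAdj] at *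
      exact (adjKeys_mem relation PySem.Dict.empty e).mpr
        (Or.inr (by simpa [PySem.Dict.keys_empty] using hx))
    · rintro ⟨k, hk, rfl⟩
      have hx : ∃ p ∈ relation, k = p.1 ∨ k = p.2 := by
        have := (adjKeys_mem relation PySem.Dict.empty k).mp (by simpa [pvAdj] using hk)
        simpa [PySem.Dict.keys_empty] using this
      exact ⟨k, (mem_S relation k).mpr hx, class_eq relation k hx⟩
  have := PySem.List.sorted_eq_sorted_of_perm _ _ (fun b : List Int => b) (fun a b h => h) hperm
  convert this using 2

-- ===== VERDICT (by name: the statement is the Claim_ definition above) =====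
theorem make_mapping_corresponding_to_equivalence_relation_spec : Claim_equal_make_mapping_corresponding_to_equivalence_relation := by
  intro relation _
  show make_mapping_corresponding_to_equivalence_relation relation
      = make_mapping_corresponding_to_equivalence_relation_alt relation
  unfold make_mapping_corresponding_to_equivalence_relation
    make_mapping_corresponding_to_equivalence_relation_alt
  rw [partition_eq]
  simp only [PySem.List.foldl_append_singleton_eq_map, PySem.List.foldl_append_eq_flatMap,
    List.nil_append]
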